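-- pv_equiv track=rewrite | github.com/tsamsonov/generalize-dem | CounterpartStreams.py | longgap
-- ===== SOURCE A (Python) =====
-- def longgap(arr):
--     brr = list(arr)
--     m = min(brr)
--     gap = 0
--     brr.sort()
--     for i in range(len(brr)):
--         if (m + i) not in brr:
--             gap += 1
--         else:
--             gap = 0
--
--         if gap > 1:
--             return True
--     return False
-- ===== SOURCE B (Python) =====
-- def longgap(arr):
--     m = min(arr)
--     n = len(arr)
--     present = set(arr)
--     missing = [v for v in range(m, m + n) if v not in present]
--     return any(b - a == 1 for a, b in zip(missing, missing[1:]))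
-- ===== Notes on version B (the rewrite author's own statement) =====
-- stated objective: alternative
-- what changed: Replaces A's single stateful gap-counter scan (with O(n) list membership inside the loop) by a two-phase build-then-scan: first collect the missing values of the window [min, min+len) via a set, then scan adjacent pairs of that list for a difference of exactly 1.
import Mathlib
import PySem

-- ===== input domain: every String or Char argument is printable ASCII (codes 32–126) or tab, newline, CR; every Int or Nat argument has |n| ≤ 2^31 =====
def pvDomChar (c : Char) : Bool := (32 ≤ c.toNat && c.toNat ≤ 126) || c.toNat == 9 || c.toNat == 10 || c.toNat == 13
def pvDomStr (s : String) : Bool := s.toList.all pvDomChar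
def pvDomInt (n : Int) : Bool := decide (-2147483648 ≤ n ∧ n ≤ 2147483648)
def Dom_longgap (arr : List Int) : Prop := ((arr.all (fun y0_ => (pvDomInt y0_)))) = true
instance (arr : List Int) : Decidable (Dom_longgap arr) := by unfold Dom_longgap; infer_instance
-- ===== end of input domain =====

-- B changes the algorithm shape (build the window's missing-value list, then scan adjacent pairs)
-- instead of A's stateful gap-counter loop; same return value, no speed claim.

-- ===== PORT A =====
-- the for-loop with early return: state is the running gap counter
def longgapGo (brr : List Int) (m : Int) : List Int → Int → Bool
  | [], _ => false
  | i :: rest, gap =>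
    let gap' := if !brr.contains (m + i) then gap + 1 else 0
    if gap' > 1 then true else longgapGo brr m rest gap'

def longgap (arr : List Int) : Bool :=
  let brr := arr
  match PySem.List.min? brr (fun x => x) with
  | none => false   -- min([]) raises ValueError; excluded by Pre_longgap
  | some m =>
    let brr := PySem.List.sorted brr (fun x => x) false
    longgapGo brr m (PySem.List.pyRange 0 (brr.length : Int) 1) 0

-- ===== PORT B =====
-- any(b - a == 1 for a, b in zip(missing, missing[1:]))
def zipAdj (l : List Int) : Bool := (l.zip l.tail).any (fun p => p.2 - p.1 == 1)

def longgap_alt (arr : List Int) : Bool :=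
  match PySem.List.min? arr (fun x => x) with
  | none => false   -- min([]) raises ValueError; excluded by Pre_longgap
  | some m =>
    let n : Int := (arr.length : Int)
    let present := PySem.Set.ofList arr
    let missing := (PySem.List.pyRange m (m + n) 1).filter (fun v => !(PySem.Set.contains present v))
    zipAdj missing

-- ===== PRECONDITION & SPEC =====
-- Pre_ excludes only the empty list, on which Python's min raises ValueError (both A and B raise there).
def Pre_longgap (arr : List Int) : Prop := arr ≠ []
instance (arr : List Int) : Decidable (Pre_longgap arr) := by unfold Pre_longgap; infer_instance
def pvWitness_longgap : List Int := [1, 3]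

def Spec_longgap (arr : List Int) (out : Bool) : Prop := out = longgap_alt arr
instance (arr : List Int) (out : Bool) : Decidable (Spec_longgap arr out) := by unfold Spec_longgap; infer_instance

-- ===== CLAIM (what is proved, stated in full; the proofs are below) =====
def Claim_equal_longgap : Prop := ∀ (arr : List Int), Dom_longgap arr → Pre_longgap arr → Spec_longgap arr (longgap arr)

-- ===== LEMMAS AND PROOFS =====

-- abstract "two adjacent window positions both missing", indexed by window length and start
def hA (q : Int → Bool) : Nat → Int → Bool
  | 0, _ => false
  | n + 1, m => (q m && decide (n ≠ 0) && q (m + 1)) || hA q n (m + 1)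

-- adjacent-pair-both-satisfy-q over an explicit list
def hasAdj (p : Int → Bool) : List Int → Bool
  | x :: y :: rest => (p x && p y) || hasAdj p (y :: rest)
  | _ => false

theorem zipAdj_cons_cons (x y : Int) (r : List Int) :
    zipAdj (x :: y :: r) = ((y - x == 1) || zipAdj (y :: r)) := by
  simp [zipAdj, List.zip]

-- A's loop from gap = 0 is the adjacency scan
theorem longgapGo_zero (brr : List Int) (m : Int) (l : List Int) :
    longgapGo brr m l 0 = hasAdj (fun i => !brr.contains (m + i)) l := by
  induction l with
  | nil => rfl
  | cons x t ih =>
    cases t with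
    | nil =>
      by_cases h : (m + x) ∈ brr <;> simp [longgapGo, hasAdj, h]
    | cons y r =>
      by_cases h : (m + x) ∈ brr
      · simpa [longgapGo, hasAdj, h] using ih
      · by_cases hy : (m + y) ∈ brr
        · simpa [longgapGo, hasAdj, h, hy] using ih
        · simp [longgapGo, hasAdj, h, hy]

-- hasAdj over a consecutive integer range is hA
theorem hasAdj_pyRange (p : Int → Bool) (n : Nat) (a : Int) :
    hasAdj p (PySem.List.pyRange a (a + (n : Int)) 1) = hA p n a := by
  induction n generalizing a with
  | zero => simp [PySem.List.pyRange_one_eq_nil, hasAdj, hA]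
  | succ k ih =>
    have h1 : PySem.List.pyRange a (a + ((k + 1 : Nat) : Int)) 1
        = a :: PySem.List.pyRange (a + 1) ((a + 1) + (k : Int)) 1 := by
      rw [PySem.List.pyRange_one_cons (by push_cast; omega)]
      congr 1
      push_cast; ring_nf
    rw [h1]
    cases k with
    | zero =>
      simp [PySem.List.pyRange_one_eq_nil, hasAdj, hA]
    | succ j =>
      have h2 : PySem.List.pyRange (a + 1) ((a + 1) + ((j + 1 : Nat) : Int)) 1
          = (a + 1) :: PySem.List.pyRange (a + 2) ((a + 2) + (j : Int)) 1 := by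
        rw [PySem.List.pyRange_one_cons (by push_cast; omega)]
        congr 1
        push_cast; ring_nf
      rw [h2]
      show ((p a && p (a+1)) || hasAdj p ((a+1) :: PySem.List.pyRange (a+2) ((a+2) + (j:Int)) 1)) = _
      rw [← h2, ih (a + 1)]
      simp [hA]

-- shifting the predicate shifts the start
theorem hA_shift (q : Int → Bool) (c : Int) (n : Nat) (a : Int) :
    hA (fun i => q (c + i)) n a = hA q n (c + a) := by
  induction n generalizing a with
  | zero => rfl
  | succ k ih =>
    show ((q (c + a) && decide (k ≠ 0) && q (c + (a + 1))) || hA (fun i => q (c + i)) k (a + 1)) = _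
    rw [ih]
    have : c + (a + 1) = c + a + 1 := by ring
    simp [hA, this]

-- the filtered-missing zip scan, with a pending smaller head x
theorem zipAdj_filter_cons (q : Int → Bool) (n : Nat) :
    ∀ (m x : Int), x < m →
    zipAdj (x :: (PySem.List.pyRange m (m + (n : Int)) 1).filter q)
      = ((decide (x = m - 1) && (decide (n ≠ 0) && q m)) || hA q n m) := by
  induction n with
  | zero =>
    intro m x _
    rw [PySem.List.pyRange_one_eq_nil (by simp)]
    simp only [List.filter_nil]
    simp [zipAdj, hA]
  | succ k ih =>
    intro m x hx
    have h1 : PySem.List.pyRange m (m + ((k + 1 : Nat) : Int)) 1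
        = m :: PySem.List.pyRange (m + 1) ((m + 1) + (k : Int)) 1 := by
      rw [PySem.List.pyRange_one_cons (by push_cast; omega)]
      congr 1
      push_cast; ring_nf
    rw [h1]
    by_cases hq : q m = true
    · rw [List.filter_cons_of_pos hq, zipAdj_cons_cons, ih (m + 1) m (by omega)]
      have e1 : (m - x == 1) = decide (x = m - 1) := by
        rw [Bool.eq_iff_iff]
        simp only [beq_iff_eq, decide_eq_true_eq]
        omega
      have e2 : decide (m = m + 1 - 1) = true := by simp
      simp only [e1, e2, Bool.true_and]
      cases hk : decide (x = m - 1)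
      · simp [hA, hq]
      · simp
        exact Or.inl hq
    · rw [List.filter_cons_of_neg (by simp [hq]), ih (m + 1) x (by omega)]
      have e3 : decide (x = m + 1 - 1) = false := by
        simp only [decide_eq_false_iff_not]; omega
      simp only [Bool.not_eq_true] at hq
      simp [hA, hq]
      intro hxe
      exact absurd hxe (by omega)

-- the filtered-missing zip scan equals hA
theorem zipAdj_filter (q : Int → Bool) (n : Nat) (m : Int) :
    zipAdj ((PySem.List.pyRange m (m + (n : Int)) 1).filter q) = hA q n m := by
  induction n generalizing m with
  | zero => simp [PySem.List.pyRange_one_eq_nil, zipAdj, hA]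
  | succ k ih =>
    have h1 : PySem.List.pyRange m (m + ((k + 1 : Nat) : Int)) 1
        = m :: PySem.List.pyRange (m + 1) ((m + 1) + (k : Int)) 1 := by
      rw [PySem.List.pyRange_one_cons (by push_cast; omega)]
      congr 1
      push_cast; ring_nf
    rw [h1]
    by_cases hq : q m = true
    · rw [List.filter_cons_of_pos hq, zipAdj_filter_cons q k (m + 1) m (by omega)]
      simp [hA, hq]
    · rw [List.filter_cons_of_neg (by simp [hq]), ih (m + 1)]
      simp only [Bool.not_eq_true] at hq
      simp [hA, hq]

-- membership through sort and set construction
theorem contains_sorted (arr : List Int) (x : Int) :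
    (PySem.List.sorted arr (fun y => y) false).contains x = arr.contains x := by
  simp [PySem.List.mem_sorted]

theorem contains_ofList (arr : List Int) (x : Int) :
    PySem.Set.contains (PySem.Set.ofList arr) x = arr.contains x := by
  rw [Bool.eq_iff_iff]
  simp [PySem.Set.mem_ofList]

-- ===== VERDICT (by name: the statement is the Claim_ definition above) =====
theorem longgap_spec : Claim_equal_longgap := by
  intro arr _ hpre
  unfold Spec_longgap
  cases hmin : PySem.List.min? arr (fun x => x) with
  | none => exact absurd ((PySem.List.min?_eq_none_iff arr _).mp hmin) hpre
  | some m =>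
    simp only [longgap, longgap_alt, hmin]
    set q : Int → Bool := fun v => !(PySem.Set.contains (PySem.Set.ofList arr) v) with hqdef
    -- B side
    rw [zipAdj_filter q arr.length m]
    -- A side
    rw [PySem.List.length_sorted]
    have hz : (0 : Int) + (arr.length : Int) = (arr.length : Int) := by ring
    rw [longgapGo_zero, ← hz, hasAdj_pyRange]
    have hpred : (fun i => !(PySem.List.sorted arr (fun y => y) false).contains (m + i))
        = (fun i => q (m + i)) := by
      funext i
      rw [hqdef]
      simp only [contains_sorted, contains_ofList]
    rw [hpred, hA_shift q m arr.length 0]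
    congr 1
    ring
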